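-- pv_equiv track=rewrite | github.com/Carperis/PlannerX | AlgorithmV1.py | checkSameTeacher
-- ===== SOURCE A (Python) =====
-- def checkSameTeacher(sections, types):
--     teachers = []
--     for type in types:
--         for section in sections:
--             if(section[3] == type):
--                 teachers.append(section[2])
--     if(len(teachers) <= 1):
--         return True
--     elif(teachers[1:] == teachers[:-1]):
--         return True
--     else:
--         return False
-- ===== SOURCE B (Python) =====
-- def checkSameTeacher(sections, types):
--     if not types:
--         return True
--     first = None
--     seen = False
--     for section in sections:
--         if section[3] in types:
--             if not seen:
--                 first = section[2]
--                 seen = True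
--             elif section[2] != first:
--                 return False
--     return True
-- ===== Notes on version B (the rewrite author's own statement) =====
-- stated objective: simpler
-- what changed: B drops the intermediate teachers list and A's types-major double loop: one pass over sections with a 'first teacher' accumulator that returns False at the first differing teacher.
import Mathlib
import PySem

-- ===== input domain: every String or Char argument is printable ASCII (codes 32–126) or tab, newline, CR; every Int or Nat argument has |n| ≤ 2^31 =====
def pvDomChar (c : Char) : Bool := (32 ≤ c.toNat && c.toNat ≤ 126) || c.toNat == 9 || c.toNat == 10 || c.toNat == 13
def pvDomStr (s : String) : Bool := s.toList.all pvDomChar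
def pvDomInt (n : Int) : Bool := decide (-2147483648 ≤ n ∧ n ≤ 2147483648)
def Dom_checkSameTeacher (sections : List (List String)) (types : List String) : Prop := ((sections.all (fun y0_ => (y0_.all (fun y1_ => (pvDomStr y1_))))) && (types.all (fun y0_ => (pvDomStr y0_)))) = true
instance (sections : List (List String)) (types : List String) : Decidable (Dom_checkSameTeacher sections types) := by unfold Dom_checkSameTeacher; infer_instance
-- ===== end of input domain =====

-- B replaces A's types-major double loop and intermediate teachers list by one pass over
-- sections with a 'first teacher' accumulator that short-circuits (objective: simpler).

-- ===== PORT A =====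
def checkSameTeacher (sections : List (List String)) (types : List String) : Bool :=
  let teachers := types.foldl (fun acc ty =>
    sections.foldl (fun acc2 sec =>
      if PySem.List.pyGetD sec 3 "" == ty then acc2 ++ [PySem.List.pyGetD sec 2 ""] else acc2)
      acc) []
  if teachers.length ≤ 1 then true
  else if PySem.List.slice teachers (some 1) none = PySem.List.slice teachers none (some (-1)) then true
  else false

-- ===== PORT B =====
def csGo (types : List String) (sections : List (List String)) (first : Option String) : Bool :=
  match sections with
  | [] => true
  | sec :: rest =>
    if types.contains (PySem.List.pyGetD sec 3 "") then
      match first with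
      | none => csGo types rest (some (PySem.List.pyGetD sec 2 ""))
      | some f => if PySem.List.pyGetD sec 2 "" ≠ f then false else csGo types rest (some f)
    else csGo types rest first

def checkSameTeacher_alt (sections : List (List String)) (types : List String) : Bool :=
  if types = [] then true else csGo types sections none

-- ===== PRECONDITION & SPEC =====
-- Pre_ excludes exactly the inputs where Python A raises IndexError: when types is nonempty,
-- A indexes section[3] of every section, so every section must have length ≥ 4.
def Pre_checkSameTeacher (sections : List (List String)) (types : List String) : Prop :=
  types = [] ∨ ∀ s ∈ sections, 4 ≤ s.length
instance (sections : List (List String)) (types : List String) : Decidable (Pre_checkSameTeacher sections types) := by unfold Pre_checkSameTeacher; infer_instance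

def pvWitness_checkSameTeacher : List (List String) × List String :=
  ([["CS101", "01", "Smith", "Lec"], ["CS101", "02", "Smith", "Lab"]], ["Lec", "Lab"])

def Spec_checkSameTeacher (sections : List (List String)) (types : List String) (out : Bool) : Prop := out = checkSameTeacher_alt sections types
instance (sections : List (List String)) (types : List String) (out : Bool) : Decidable (Spec_checkSameTeacher sections types out) := by unfold Spec_checkSameTeacher; infer_instance

-- ===== CLAIM =====
def Claim_equal_checkSameTeacher : Prop := ∀ (sections : List (List String)) (types : List String), Dom_checkSameTeacher sections types → Pre_checkSameTeacher sections types → Spec_checkSameTeacher sections types (checkSameTeacher sections types)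

-- ===== LEMMAS AND PROOFS =====

-- all elements of a list are equal
def allEq (l : List String) : Prop := ∀ x ∈ l, ∀ y ∈ l, x = y

def teachersA (sections : List (List String)) (types : List String) : List String :=
  types.flatMap (fun ty =>
    (sections.filter (fun sec => PySem.List.pyGetD sec 3 "" == ty)).map
      (fun sec => PySem.List.pyGetD sec 2 ""))

def listB (sections : List (List String)) (types : List String) : List String :=
  (sections.filter (fun sec => types.contains (PySem.List.pyGetD sec 3 ""))).map
    (fun sec => PySem.List.pyGetD sec 2 "")

lemma teachersA_eq (sections : List (List String)) (types : List String) :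
    types.foldl (fun acc ty =>
      sections.foldl (fun acc2 sec =>
        if PySem.List.pyGetD sec 3 "" == ty then acc2 ++ [PySem.List.pyGetD sec 2 ""] else acc2)
        acc) [] = teachersA sections types := by
  have h : ∀ acc, types.foldl (fun acc ty =>
      sections.foldl (fun acc2 sec =>
        if PySem.List.pyGetD sec 3 "" == ty then acc2 ++ [PySem.List.pyGetD sec 2 ""] else acc2)
        acc) acc = acc ++ teachersA sections types := by
    intro acc
    rw [show (fun acc ty =>
      sections.foldl (fun acc2 sec =>
        if PySem.List.pyGetD sec 3 "" == ty then acc2 ++ [PySem.List.pyGetD sec 2 ""] else acc2)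
        acc) = (fun acc ty => acc ++
          ((sections.filter (fun sec => PySem.List.pyGetD sec 3 "" == ty)).map
            (fun sec => PySem.List.pyGetD sec 2 ""))) from ?_]
    · exact PySem.List.foldl_append_eq_flatMap _ _ _
    · funext acc2 ty
      exact PySem.List.foldl_append_if _ _ _ _
  simpa using h []

lemma mem_teachersA_iff_mem_listB (sections : List (List String)) (types : List String)
    (x : String) : x ∈ teachersA sections types ↔ x ∈ listB sections types := by
  simp only [teachersA, listB, List.mem_flatMap, List.mem_map, List.mem_filter,
    List.contains_iff_exists_mem_beq, beq_iff_eq]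
  constructor
  · rintro ⟨ty, hty, sec, ⟨hsec, h3⟩, hx⟩
    exact ⟨sec, ⟨hsec, ⟨ty, hty, by simpa using h3⟩⟩, hx⟩
  · rintro ⟨sec, ⟨hsec, ty, hty, h3⟩, hx⟩
    exact ⟨ty, hty, sec, ⟨hsec, by simpa using h3⟩, hx⟩

lemma allEq_iff_of_mem_iff {l l' : List String} (h : ∀ x, x ∈ l ↔ x ∈ l') :
    allEq l ↔ allEq l' := by
  unfold allEq
  constructor <;> intro ha x hx y hy
  · exact ha x ((h x).mpr hx) y ((h y).mpr hy)
  · exact ha x ((h x).mp hx) y ((h y).mp hy)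

lemma allEq_cons (a : String) (l : List String) :
    allEq (a :: l) ↔ ∀ x ∈ l, x = a := by
  unfold allEq
  constructor
  · intro h x hx
    exact h x (by simp [hx]) a (by simp)
  · intro h x hx y hy
    have hx' : x = a := by
      rcases List.mem_cons.mp hx with h' | h'
      · exact h'
      · exact h x h'
    have hy' : y = a := by
      rcases List.mem_cons.mp hy with h' | h'
      · exact h'
      · exact h y h'
    rw [hx', hy']

lemma allEq_of_length_le_one (l : List String) (h : l.length ≤ 1) : allEq l := by
  match l with
  | [] => intro x hx; simp at hx
  | [a] =>
    intro x hx y hy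
    simp at hx hy; rw [hx, hy]
  | a :: b :: u => simp at h

lemma tail_eq_dropLast_iff (l : List String) : l.tail = l.dropLast ↔ allEq l := by
  induction l with
  | nil => simp [allEq]
  | cons a t ih =>
    cases t with
    | nil => simp [allEq]
    | cons b u =>
      have hd : (a :: b :: u).dropLast = a :: (b :: u).dropLast := List.dropLast_cons₂ ..
      constructor
      · intro h
        rw [List.tail_cons, hd] at h
        obtain ⟨hba, hrest⟩ := List.cons_eq_cons.mp h
        have hall : allEq (b :: u) := ih.mp (by rw [List.tail_cons]; exact hrest)
        subst hba
        rw [allEq_cons]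
        intro x hx
        exact hall x hx b List.mem_cons_self
      · intro h
        have hba : b = a := h b (by simp) a (by simp)
        have hall : allEq (b :: u) := fun x hx y hy =>
          h x (List.mem_cons_of_mem _ hx) y (List.mem_cons_of_mem _ hy)
        have ht := ih.mpr hall
        rw [List.tail_cons] at ht
        rw [List.tail_cons, hd, ← hba]
        exact congrArg (List.cons b) ht

lemma checkA_iff (sections : List (List String)) (types : List String) :
    checkSameTeacher sections types = true ↔ allEq (teachersA sections types) := by
  unfold checkSameTeacher
  rw [teachersA_eq]
  simp only [PySem.List.slice_from_one, PySem.List.slice_to_neg_one]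
  set l := teachersA sections types with hl
  split_ifs with h1 h2
  · simp only [true_iff]
    exact allEq_of_length_le_one l h1
  · simp only [true_iff]
    exact (tail_eq_dropLast_iff l).mp h2
  · simp only [false_iff]
    intro ha
    exact h2 ((tail_eq_dropLast_iff l).mpr ha)

lemma listB_cons_pos (sec : List String) (rest : List (List String)) (types : List String)
    (hm : PySem.List.pyGetD sec 3 "" ∈ types) :
    listB (sec :: rest) types = PySem.List.pyGetD sec 2 "" :: listB rest types := by
  simp [listB, hm]

lemma listB_cons_neg (sec : List String) (rest : List (List String)) (types : List String)
    (hm : PySem.List.pyGetD sec 3 "" ∉ types) :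
    listB (sec :: rest) types = listB rest types := by
  simp [listB, hm]

lemma csGo_some (types : List String) (sections : List (List String)) (f : String) :
    csGo types sections (some f) = true ↔ ∀ x ∈ listB sections types, x = f := by
  induction sections with
  | nil => simp [csGo, listB]
  | cons sec rest ih =>
    by_cases hm : PySem.List.pyGetD sec 3 "" ∈ types
    · have hc : types.contains (PySem.List.pyGetD sec 3 "") = true := by simpa using hm
      rw [listB_cons_pos sec rest types hm]
      simp only [csGo, hc, if_true]
      by_cases he : PySem.List.pyGetD sec 2 "" = f
      · simp only [he, ne_eq, not_true_eq_false, if_false, ih]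
        constructor
        · intro h x hx
          rcases List.mem_cons.mp hx with rfl | hx'
          · rfl
          · exact h x hx'
        · intro h x hx
          exact h x (List.mem_cons_of_mem _ hx)
      · simp only [he, ne_eq, not_false_eq_true, if_true]
        constructor
        · intro h
          exact absurd h (by simp)
        · intro h
          exact (he (h _ List.mem_cons_self)).elim
    · have hc : types.contains (PySem.List.pyGetD sec 3 "") = false := by simpa using hm
      rw [listB_cons_neg sec rest types hm]
      simp only [csGo, hc, Bool.false_eq_true, if_false]
      exact ih

lemma csGo_none (types : List String) (sections : List (List String)) :
    csGo types sections none = true ↔ allEq (listB sections types) := by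
  induction sections with
  | nil =>
    simp only [csGo, listB, List.filter_nil, List.map_nil, true_iff]
    intro x hx; simp at hx
  | cons sec rest ih =>
    by_cases hm : PySem.List.pyGetD sec 3 "" ∈ types
    · have hc : types.contains (PySem.List.pyGetD sec 3 "") = true := by simpa using hm
      rw [listB_cons_pos sec rest types hm, allEq_cons]
      simp only [csGo, hc, if_true]
      exact csGo_some types rest _
    · have hc : types.contains (PySem.List.pyGetD sec 3 "") = false := by simpa using hm
      rw [listB_cons_neg sec rest types hm]
      simp only [csGo, hc, Bool.false_eq_true, if_false]
      exact ih

lemma checkB_iff (sections : List (List String)) (types : List String) :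
    checkSameTeacher_alt sections types = true ↔ allEq (listB sections types) := by
  unfold checkSameTeacher_alt
  split_ifs with h
  · subst h
    have hnil : listB sections [] = [] := by
      simp [listB]
    simp only [hnil, true_iff]
    intro x hx; simp at hx
  · exact csGo_none types sections

-- ===== VERDICT =====
theorem checkSameTeacher_spec : Claim_equal_checkSameTeacher := by
  intro sections types _ _
  unfold Spec_checkSameTeacher
  rw [Bool.eq_iff_iff, checkA_iff sections types, checkB_iff sections types]
  exact allEq_iff_of_mem_iff (mem_teachersA_iff_mem_listB sections types)
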